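-- pv_equiv track=rewrite | github.com/christopherwalkerml/MonPyBot | commands/GetPic.py | addString
-- ===== SOURCE A (Python) =====
-- def addString(string, index):
--     lst = [c for c in string]
--     if index == 6:
--         return "000000"
--     elif lst[-index] == '9':
--         lst[-index] = 'a'
--     elif lst[-index] == 'z':
--         lst = [c for c in addString(''.join(lst), index + 1)]
--         lst[-index] = '0'
--     else:
--         lst[-index] = chr(ord(lst[-index]) + 1)
--     return ''.join(lst)
-- ===== SOURCE B (Python) =====
-- def addString(string, index):
--     # Scan the ORIGINAL string leftwards to find where the carry stops,
--     # then build the result in one construction (no recursion).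
--     j = index
--     while j != 6:
--         if string[-j] != 'z':
--             break
--         j += 1
--     if j == 6:
--         return "000000"
--     c = string[-j]
--     lst = list(string)
--     lst[-j] = 'a' if c == '9' else chr(ord(c) + 1)
--     for i in range(j - 1, index - 1, -1):
--         lst[-i] = '0'
--     return ''.join(lst)
-- ===== Notes on version B (the rewrite author's own statement) =====
-- stated objective: alternative
-- what changed: A's recursive carry (one recursive call per carried 'z', rebuilding and re-listing the string at every level) is replaced by a single non-recursive scan of the original string that finds where the carry stops, followed by one direct construction of the result list.
import Mathlib
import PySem

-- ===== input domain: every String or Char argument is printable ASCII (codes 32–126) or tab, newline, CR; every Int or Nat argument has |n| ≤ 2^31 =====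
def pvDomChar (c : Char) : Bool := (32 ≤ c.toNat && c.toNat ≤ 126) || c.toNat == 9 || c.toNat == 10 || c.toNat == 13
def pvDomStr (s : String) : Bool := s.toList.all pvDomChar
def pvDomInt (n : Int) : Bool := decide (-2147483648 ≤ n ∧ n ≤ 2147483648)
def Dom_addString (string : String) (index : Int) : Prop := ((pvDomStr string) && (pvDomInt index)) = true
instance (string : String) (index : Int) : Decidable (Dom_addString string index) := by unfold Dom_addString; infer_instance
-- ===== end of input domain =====

-- B replaces A's recursive carry (one recursive call per carried 'z') by a single scan of the
-- original string that finds where the carry stops, followed by one direct construction of the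
-- result; objective: alternative (non-recursive) decomposition, same exact behaviour.

-- ===== PORT A =====
-- Literal port of A.  Where Python raises IndexError (pyGet?/pySet? = none) the port
-- returns "" — those inputs are exactly the ones excluded by Pre_addString.
def addString (string : String) (index : Int) : String :=
  let lst := string.toList
  if index = 6 then "000000"
  else
    match h : PySem.List.pyGet? lst (-index) with
    | none => ""  -- Python: IndexError (outside Pre_)
    | some c =>
      if c = '9' then String.ofList (PySem.List.pySetD lst (-index) 'a')
      else if c = 'z' then
        -- lst is still unmodified here, so ''.join(lst) is the original string
        match PySem.List.pySet? (addString (String.ofList lst) (index + 1)).toList (-index) '0' with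
        | none => ""  -- Python: IndexError (outside Pre_)
        | some l => String.ofList l
      else String.ofList (PySem.List.pySetD lst (-index) (Char.ofNat (c.toNat + 1)))
termination_by (string.toList.length + 7 - index).toNat
decreasing_by
  have hr : PySem.Raise.InRange string.toList.length (-index) := by
    by_contra hc
    rw [← PySem.List.pyGet?_eq_none_iff] at hc
    simp only [lst] at h
    simp [h] at hc
  have h1 : index ≤ (string.toList.length : Int) := by
    have := hr.1; omega
  simp only [String.toList_ofList]
  omega

-- ===== PORT B =====
-- the 'while j != 6: if string[-j] != 'z': break; j += 1' loop of B; none = IndexError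
def bCarryEnd (s : List Char) (j : Int) : Option Int :=
  if j = 6 then some 6
  else
    match h : PySem.List.pyGet? s (-j) with
    | none => none  -- Python: IndexError (outside Pre_)
    | some c => if c ≠ 'z' then some j else bCarryEnd s (j + 1)
termination_by (s.length + 7 - j).toNat
decreasing_by
  have hr : PySem.Raise.InRange s.length (-j) := by
    by_contra hc
    rw [← PySem.List.pyGet?_eq_none_iff] at hc
    simp [h] at hc
  have h1 : j ≤ (s.length : Int) := by have := hr.1; omega
  omega

def addString_alt (string : String) (index : Int) : String :=
  let s := string.toList
  match bCarryEnd s index with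
  | none => ""  -- Python: IndexError (outside Pre_)
  | some j =>
    if j = 6 then "000000"
    else
      let c := PySem.List.pyGetD s (-j) ' '
      let lst := PySem.List.pySetD s (-j) (if c = '9' then 'a' else Char.ofNat (c.toNat + 1))
      String.ofList ((PySem.List.pyRange (j - 1) (index - 1) (-1)).foldl
        (fun acc i => PySem.List.pySetD acc (-i) '0') lst)

-- ===== PRECONDITION & SPEC =====
-- Pre_ holds exactly where Python A returns normally: the leftward scan from position -index
-- over the ORIGINAL characters reads only in-range positions and either reaches carry index 6
-- (then index ≥ -5, so the final writes onto "000000" are in range) or stops at a non-'z'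
-- character without crossing 6; everywhere else A raises IndexError.
def Pre_addString (string : String) (index : Int) : Prop :=
  ∃ j ∈ PySem.List.pyRange index
      (min (max 6 (string.toList.length : Int) + 1) (index + (string.toList.length : Int) + 7)) 1,
    (∀ i ∈ PySem.List.pyRange index j 1,
      PySem.Raise.InRange string.toList.length (-i) ∧
      PySem.List.pyGetD string.toList (-i) ' ' = 'z') ∧
    ((j = 6 ∧ -5 ≤ index) ∨
     ((j < 6 ∨ 6 < index) ∧ PySem.Raise.InRange string.toList.length (-j) ∧
      PySem.List.pyGetD string.toList (-j) ' ' ≠ 'z'))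
instance (string : String) (index : Int) : Decidable (Pre_addString string index) := by
  unfold Pre_addString; infer_instance

def pvWitness_addString : String × Int := ("abz9", 1)

def Spec_addString (string : String) (index : Int) (out : String) : Prop := out = addString_alt string index
instance (string : String) (index : Int) (out : String) : Decidable (Spec_addString string index out) := by unfold Spec_addString; infer_instance

-- ===== CLAIM (what is proved, stated in full; the proofs are below) =====
def Claim_equal_addString : Prop := ∀ (string : String) (index : Int), Dom_addString string index → Pre_addString string index → Spec_addString string index (addString string index)


-- ===== LEMMAS AND PROOFS =====

lemma pvInRange_pyGet?_eq (xs : List Char) (i : Int) (h : PySem.Raise.InRange xs.length i) :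
    PySem.List.pyGet? xs i = some (PySem.List.pyGetD xs i ' ') := by
  cases hx : PySem.List.pyGet? xs i with
  | none => rw [PySem.List.pyGet?_eq_none_iff] at hx; exact absurd h hx
  | some a => simp [PySem.List.pyGetD, hx]

lemma pvInRange_pySet?_eq (xs : List Char) (i : Int) (v : Char)
    (h : PySem.Raise.InRange xs.length i) :
    PySem.List.pySet? xs i v = some (PySem.List.pySetD xs i v) := by
  cases hx : PySem.List.pySet? xs i v with
  | none => rw [PySem.List.pySet?_eq_none_iff] at hx; exact absurd h hx
  | some a => simp [PySem.List.pySetD, hx]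

-- total zero-writing fold used on B's side
def pvZeroFold (init : List Char) (a b : Int) : List Char :=
  (PySem.List.pyRange a b (-1)).foldl (fun acc i => PySem.List.pySetD acc (-i) '0') init

lemma pvLength_zeroFold (l : List Int) (init : List Char) :
    (l.foldl (fun acc i => PySem.List.pySetD acc (-i) '0') init).length = init.length := by
  induction l generalizing init with
  | nil => rfl
  | cons x xs ih => simp [List.foldl, PySem.List.length_pySetD, ih]

lemma pvPyRange_neg_one (a b : Int) :
    PySem.List.pyRange a b (-1) = (List.range (a - b).toNat).map (fun k : Nat => a - (k : Int)) := by
  simp only [PySem.List.pyRange]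
  rw [if_neg (by norm_num : ¬((-1:Int) = 0)), if_neg (by norm_num : ¬((0:Int) < -1))]
  split_ifs with h
  · rw [show (a - b + - (-1:Int) - 1) / - (-1:Int) = a - b by norm_num]
    apply List.map_congr_left; intro k _; ring
  · have : (a - b).toNat = 0 := by omega
    simp [this]

lemma pvPyRange_neg_one_split (a b : Int) (h : b ≤ a) :
    PySem.List.pyRange a (b - 1) (-1) = PySem.List.pyRange a b (-1) ++ [b] := by
  have h1 : (a - (b - 1)).toNat = (a - b).toNat + 1 := by omega
  rw [pvPyRange_neg_one, pvPyRange_neg_one, h1, List.range_succ, List.map_append]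
  congr 1
  simp only [List.map_cons, List.map_nil]
  congr 1
  omega

-- B's scan loop stops exactly at the Pre_-witness j
lemma pvZeroFold_self (init : List Char) (a : Int) : pvZeroFold init a a = init := by
  simp [pvZeroFold]

lemma pvBCarryEnd_eq (d : Nat) : ∀ (s : List Char) (index j : Int),
    j - index = (d : Int) →
    (∀ i, index ≤ i → i < j → PySem.Raise.InRange s.length (-i) ∧
      PySem.List.pyGetD s (-i) ' ' = 'z') →
    (j = 6 ∨
     ((j < 6 ∨ 6 < index) ∧ PySem.Raise.InRange s.length (-j) ∧
      PySem.List.pyGetD s (-j) ' ' ≠ 'z')) →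
    bCarryEnd s index = some j := by
  induction d with
  | zero =>
    intro s index j hd hchain hstop
    have hij : j = index := by omega
    subst hij
    rw [bCarryEnd.eq_def]
    rcases hstop with h6 | ⟨hlt, hin, hne⟩
    · rw [if_pos h6, h6]
    · have h6 : ¬ (j = 6) := by omega
      rw [if_neg h6]
      split
      · next heq => simp [pvInRange_pyGet?_eq s (-j) hin] at heq
      · next c heq =>
        rw [pvInRange_pyGet?_eq s (-j) hin] at heq
        have hc : PySem.List.pyGetD s (-j) ' ' = c := by injection heq
        simp [← hc, hne]
  | succ d ih =>
    intro s index j hd hchain hstop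
    have hlt : index < j := by omega
    have h6 : index ≠ 6 := by rcases hstop with h6' | ⟨h6', _, _⟩ <;> omega
    obtain ⟨hin, hz⟩ := hchain index le_rfl hlt
    rw [bCarryEnd.eq_def, if_neg h6]
    split
    · next heq => simp [pvInRange_pyGet?_eq s (-index) hin] at heq
    · next c heq =>
      rw [pvInRange_pyGet?_eq s (-index) hin] at heq
      have hc : c = 'z' := by rw [hz] at heq; injection heq with h'; exact h'.symm
      rw [if_neg (by simp [hc])]
      refine ih s (index + 1) j (by omega) (fun i h1 h2 => hchain i (by omega) h2) ?_
      rcases hstop with hj6 | hr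
      · exact Or.inl hj6
      · refine Or.inr ⟨?_, hr.2.1, hr.2.2⟩
        rcases hr.1 with h | h
        · exact Or.inl h
        · exact Or.inr (by omega)

-- A's recursion computes B's "one construction" form
lemma pvAddString_eq (d : Nat) : ∀ (string : String) (index j : Int),
    j - index = (d : Int) →
    (∀ i, index ≤ i → i < j → PySem.Raise.InRange string.toList.length (-i) ∧
      PySem.List.pyGetD string.toList (-i) ' ' = 'z') →
    ((j = 6 ∧ -5 ≤ index) ∨
     ((j < 6 ∨ 6 < index) ∧ PySem.Raise.InRange string.toList.length (-j) ∧
      PySem.List.pyGetD string.toList (-j) ' ' ≠ 'z')) →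
    addString string index =
      (if j = 6 then "000000"
       else String.ofList (pvZeroFold
         (PySem.List.pySetD string.toList (-j)
           (if PySem.List.pyGetD string.toList (-j) ' ' = '9' then 'a'
            else Char.ofNat ((PySem.List.pyGetD string.toList (-j) ' ').toNat + 1)))
         (j - 1) (index - 1))) := by
  induction d with
  | zero =>
    intro string index j hd hchain hstop
    have hij : j = index := by omega
    subst hij
    rcases hstop with ⟨h6, _⟩ | ⟨hlt6, hin, hne⟩
    · rw [if_pos h6, addString.eq_def, if_pos h6]
    · have h6 : ¬ (j = 6) := by omega
      rw [if_neg h6, addString.eq_def, if_neg h6]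
      split
      · next heq => simp [pvInRange_pyGet?_eq _ _ hin] at heq
      · next c heq =>
        rw [pvInRange_pyGet?_eq _ _ hin] at heq
        have hc : PySem.List.pyGetD string.toList (-j) ' ' = c := by injection heq
        rw [pvZeroFold_self, hc]
        have hzc : ¬ (c = 'z') := by rw [hc] at hne; exact hne
        by_cases h9 : c = '9'
        · rw [if_pos h9, if_pos h9]
        · rw [if_neg h9, if_neg hzc, if_neg h9]
  | succ d ih =>
    intro string index j hd hchain hstop
    have hlt : index < j := by omega
    have h6 : index ≠ 6 := by rcases hstop with ⟨h6', _⟩ | ⟨h6', _, _⟩ <;> omega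
    obtain ⟨hin, hz⟩ := hchain index le_rfl hlt
    rw [addString.eq_def, if_neg h6]
    split
    · next heq => simp [pvInRange_pyGet?_eq _ _ hin] at heq
    · next c heq =>
      rw [pvInRange_pyGet?_eq _ _ hin] at heq
      have hc : c = 'z' := by rw [hz] at heq; injection heq with h'; exact h'.symm
      subst hc
      rw [if_neg (by decide), if_pos rfl]
      have hchain2 : ∀ i, index + 1 ≤ i → i < j →
          PySem.Raise.InRange (String.ofList string.toList).toList.length (-i) ∧
          PySem.List.pyGetD (String.ofList string.toList).toList (-i) ' ' = 'z' := by
        simp only [String.toList_ofList]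
        exact fun i h1 h2 => hchain i (by omega) h2
      have hstop2 : ((j = 6 ∧ -5 ≤ index + 1) ∨
          ((j < 6 ∨ 6 < index + 1) ∧
           PySem.Raise.InRange (String.ofList string.toList).toList.length (-j) ∧
           PySem.List.pyGetD (String.ofList string.toList).toList (-j) ' ' ≠ 'z')) := by
        simp only [String.toList_ofList]
        rcases hstop with ⟨hj6, hge⟩ | hr
        · exact Or.inl ⟨hj6, by omega⟩
        · refine Or.inr ⟨?_, hr.2.1, hr.2.2⟩
          rcases hr.1 with h | h
          · exact Or.inl h
          · exact Or.inr (by omega)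
      have hrec := ih (String.ofList string.toList) (index + 1) j (by omega) hchain2 hstop2
      simp only [String.toList_ofList] at hrec
      rw [hrec]
      rcases hstop with ⟨hj6, hge⟩ | ⟨hlt6, hinj, hnej⟩
      · subst hj6
        rw [if_pos rfl, if_pos rfl]
        have hle : index ≤ 5 := by omega
        interval_cases index <;> decide
      · have h6' : ¬ (j = 6) := by omega
        rw [if_neg h6', if_neg h6']
        rw [String.toList_ofList]
        have hlen : (pvZeroFold
            (PySem.List.pySetD string.toList (-j)
              (if PySem.List.pyGetD string.toList (-j) ' ' = '9' then 'a'
               else Char.ofNat ((PySem.List.pyGetD string.toList (-j) ' ').toNat + 1)))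
            (j - 1) (index + 1 - 1)).length = string.toList.length := by
          rw [pvZeroFold, pvLength_zeroFold, PySem.List.length_pySetD]
        rw [pvInRange_pySet?_eq _ _ _ (by rw [hlen]; exact hin)]
        have hsplit : (index : Int) + 1 - 1 = index := by omega
        rw [hsplit]
        change String.ofList _ = _
        congr 1
        rw [pvZeroFold, pvZeroFold, pvPyRange_neg_one_split (j - 1) index (by omega),
            List.foldl_append]
        rfl

lemma pvAlt_eq (string : String) (index j : Int)
    (hb : bCarryEnd string.toList index = some j) :
    addString_alt string index =
      (if j = 6 then "000000"
       else String.ofList (pvZeroFold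
         (PySem.List.pySetD string.toList (-j)
           (if PySem.List.pyGetD string.toList (-j) ' ' = '9' then 'a'
            else Char.ofNat ((PySem.List.pyGetD string.toList (-j) ' ').toNat + 1)))
         (j - 1) (index - 1))) := by
  simp only [addString_alt, hb, pvZeroFold]

-- ===== VERDICT (by name: the statement is the Claim_ definition above) =====
theorem addString_spec : Claim_equal_addString := by
  intro string index _hDom hPre
  unfold Spec_addString
  obtain ⟨j, hj, hchain, hstop⟩ := hPre
  have hchain' : ∀ i, index ≤ i → i < j → PySem.Raise.InRange string.toList.length (-i) ∧
      PySem.List.pyGetD string.toList (-i) ' ' = 'z' := by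
    intro i h1 h2; exact hchain i (by rw [PySem.List.mem_pyRange_one]; omega)
  have hjj := PySem.List.mem_pyRange_one.mp hj
  have hd : j - index = ((j - index).toNat : Int) := by omega
  have hstopW : j = 6 ∨
      ((j < 6 ∨ 6 < index) ∧ PySem.Raise.InRange string.toList.length (-j) ∧
       PySem.List.pyGetD string.toList (-j) ' ' ≠ 'z') := by
    rcases hstop with ⟨h, _⟩ | hr
    · exact Or.inl h
    · exact Or.inr hr
  rw [pvAddString_eq (j - index).toNat string index j hd hchain' hstop,
      pvAlt_eq string index j (pvBCarryEnd_eq (j - index).toNat string.toList index j hd hchain' hstopW)]
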